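-- pv_equiv track=rewrite | github.com/zhoudengt/HiFate-bazi | services/home_fengshui/mingua_calculator.py | calc_mingua
-- ===== SOURCE A (Python) =====
-- def calc_mingua(birth_year: int, gender: str) -> int:
--     """
--     计算八宅命卦（1-9，5男归坤2，5女归艮8）
--
--     男命：(11 - (各位数字之和 % 9)) % 9，结果0取9
--     女命：((各位数字之和 % 9) + 4) % 9，结果0取9
--
--     Args:
--         birth_year: 出生年份（公历）
--         gender: 'male' 或 'female'
--
--     Returns:
--         命卦数字 1-9（无5）
--     """
--     digit_sum = sum(int(d) for d in str(birth_year))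
--     while digit_sum >= 10:
--         digit_sum = sum(int(d) for d in str(digit_sum))
--
--     if gender == 'male':
--         gua = (11 - digit_sum) % 9 or 9
--         return 2 if gua == 5 else gua
--     else:
--         gua = (digit_sum + 4) % 9 or 9
--         return 8 if gua == 5 else gua
-- ===== SOURCE B (Python) =====
-- _MALE = (2, 1, 9, 8, 7, 6, 2, 4, 3)
-- _FEMALE = (4, 8, 6, 7, 8, 9, 1, 2, 3)
--
--
-- def calc_mingua(birth_year: int, gender: str) -> int:
--     # digit sum ≡ birth_year (mod 9), and both output formulas only depend on
--     # the digit sum mod 9, so one table lookup replaces the reduction loop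
--     # and the two per-gender formula/fix-up chains.
--     r = sum(int(d) for d in str(birth_year)) % 9
--     return _MALE[r] if gender == 'male' else _FEMALE[r]
-- ===== Notes on version B (the rewrite author's own statement) =====
-- stated objective: simpler
-- what changed: B drops A's digit-root while-loop (digit sum is already congruent to the year mod 9 and both formulas are mod-9) and replaces the two per-gender formula + 0-to-9 + 5-to-2/8 fix-up chains with a single lookup into two precomputed 9-entry tables indexed by digit_sum % 9.
import Mathlib
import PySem

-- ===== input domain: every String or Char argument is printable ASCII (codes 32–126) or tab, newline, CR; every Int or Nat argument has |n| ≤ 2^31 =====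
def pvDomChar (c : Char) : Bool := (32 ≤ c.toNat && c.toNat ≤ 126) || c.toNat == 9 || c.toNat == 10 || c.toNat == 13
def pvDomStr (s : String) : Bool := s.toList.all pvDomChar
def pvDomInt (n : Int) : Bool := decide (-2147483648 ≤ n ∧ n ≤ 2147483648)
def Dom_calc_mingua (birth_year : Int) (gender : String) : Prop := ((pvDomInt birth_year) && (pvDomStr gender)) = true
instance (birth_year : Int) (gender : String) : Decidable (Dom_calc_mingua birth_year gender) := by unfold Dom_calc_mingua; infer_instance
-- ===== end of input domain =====

-- B replaces A's digit-root while-loop and per-gender formula/fix-up chains with one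
-- digit-sum-mod-9 table lookup (objective: simpler).

-- ===== PORT A =====
-- int(d) for a single character d; exact on digit characters (Pre_ excludes negative
-- years, whose str contains '-', on which Python raises ValueError).
def pvCharVal (c : Char) : Int := (PySem.Int.ofChars? [c]).getD 0

-- sum(int(d) for d in str(n))
def pvDigitSum (n : Int) : Int := ((PySem.Int.toChars n).map pvCharVal).sum

-- 'while digit_sum >= 10: digit_sum = sum(...)', fuel-bounded (fuel only makes the
-- recursion total; 100 is far beyond the ≤3 iterations any |n| ≤ 2^31 needs).
def pvReduce : Nat → Int → Int
  | 0, ds => ds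
  | fuel + 1, ds => if ds ≥ 10 then pvReduce fuel (pvDigitSum ds) else ds

def calc_mingua (birth_year : Int) (gender : String) : Int :=
  let digit_sum := pvReduce 100 (pvDigitSum birth_year)
  if gender == "male" then
    let gua0 := PySem.Int.mod (11 - digit_sum) 9
    let gua := if gua0 = 0 then 9 else gua0      -- `or 9`
    if gua = 5 then 2 else gua
  else
    let gua0 := PySem.Int.mod (digit_sum + 4) 9
    let gua := if gua0 = 0 then 9 else gua0      -- `or 9`
    if gua = 5 then 8 else gua

-- ===== PORT B =====
def pvMaleTable : List Int := [2, 1, 9, 8, 7, 6, 2, 4, 3]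
def pvFemaleTable : List Int := [4, 8, 6, 7, 8, 9, 1, 2, 3]

def calc_mingua_alt (birth_year : Int) (gender : String) : Int :=
  let r := PySem.Int.mod (pvDigitSum birth_year) 9
  if gender == "male" then (PySem.List.pyGet? pvMaleTable r).getD 0
  else (PySem.List.pyGet? pvFemaleTable r).getD 0

-- ===== PRECONDITION & SPEC =====
-- Pre_ excludes exactly the negative years: there str(birth_year) starts with '-' and
-- Python's int('-') raises ValueError in both A and B.
def Pre_calc_mingua (birth_year : Int) (gender : String) : Prop := 0 ≤ birth_year
instance (birth_year : Int) (gender : String) : Decidable (Pre_calc_mingua birth_year gender) := by unfold Pre_calc_mingua; infer_instance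
def pvWitness_calc_mingua : Int × String := (1987, "female")

def Spec_calc_mingua (birth_year : Int) (gender : String) (out : Int) : Prop := out = calc_mingua_alt birth_year gender
instance (birth_year : Int) (gender : String) (out : Int) : Decidable (Spec_calc_mingua birth_year gender out) := by unfold Spec_calc_mingua; infer_instance

-- ===== CLAIM (what is proved, stated in full; the proofs are below) =====
def Claim_equal_calc_mingua : Prop := ∀ (birth_year : Int) (gender : String), Dom_calc_mingua birth_year gender → Pre_calc_mingua birth_year gender → Spec_calc_mingua birth_year gender (calc_mingua birth_year gender)

-- ===== LEMMAS AND PROOFS =====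

-- recursive digit sum of a natural number (proof-side mirror of pvDigitSum)
def pvDigitSumNat (n : Nat) : Nat :=
  if h : n < 10 then n else n % 10 + pvDigitSumNat (n / 10)
  decreasing_by exact Nat.div_lt_self (by omega) (by omega)

lemma pvCharVal_digitChar (d : Nat) (h : d < 10) : pvCharVal (Nat.digitChar d) = (d : Int) := by
  interval_cases d <;> decide

lemma toDigitsCore_sum (fuel : Nat) : ∀ (n : Nat) (ds : List Char), n < fuel →
    ((Nat.toDigitsCore 10 fuel n ds).map pvCharVal).sum
      = (pvDigitSumNat n : Int) + ((ds.map pvCharVal).sum) := by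
  induction fuel with
  | zero => intro n ds h; omega
  | succ fuel ih =>
    intro n ds h
    rw [Nat.toDigitsCore]
    by_cases h10 : n / 10 = 0
    · rw [if_pos h10]
      have hn : n < 10 := by omega
      rw [pvDigitSumNat, dif_pos hn]
      simp [Nat.mod_eq_of_lt hn, pvCharVal_digitChar n hn]
    · rw [if_neg h10]
      have hn : ¬ n < 10 := by omega
      conv_rhs => rw [pvDigitSumNat]
      rw [dif_neg hn, ih (n / 10) _ (by omega)]
      simp [pvCharVal_digitChar (n % 10) (by omega)]
      push_cast
      ring

lemma pvDigitSum_nonneg_eq (n : Int) (h : 0 ≤ n) :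
    pvDigitSum n = (pvDigitSumNat n.toNat : Int) := by
  unfold pvDigitSum PySem.Int.toChars
  rw [if_neg (by omega)]
  unfold Nat.toDigits
  rw [toDigitsCore_sum (n.toNat + 1) n.toNat [] (by omega)]
  simp

lemma pvDigitSumNat_modEq (n : Nat) : pvDigitSumNat n ≡ n [MOD 9] := by
  induction n using Nat.strong_induction_on with
  | _ n ih =>
    by_cases h : n < 10
    · rw [pvDigitSumNat, dif_pos h]
    · rw [pvDigitSumNat, dif_neg h]
      have hd := ih (n / 10) (Nat.div_lt_self (by omega) (by omega))
      have h10 : n = 10 * (n / 10) + n % 10 := by omega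
      calc n % 10 + pvDigitSumNat (n / 10) ≡ n % 10 + n / 10 [MOD 9] :=
            Nat.ModEq.add_left _ hd
        _ ≡ n % 10 + 10 * (n / 10) [MOD 9] := by
            have : (1 : Nat) * (n / 10) ≡ 10 * (n / 10) [MOD 9] :=
              Nat.ModEq.mul_right _ (by decide)
            simpa using Nat.ModEq.add_left (n % 10) this
        _ = n := by omega

lemma pvDigitSum_emod (n : Int) (h : 0 ≤ n) : pvDigitSum n % 9 = n % 9 := by
  rw [pvDigitSum_nonneg_eq n h]
  have := pvDigitSumNat_modEq n.toNat
  unfold Nat.ModEq at this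
  have hn : ((pvDigitSumNat n.toNat : Int)) % 9 = ((n.toNat : Int)) % 9 := by
    omega
  rw [hn]
  congr 1
  omega

lemma pvDigitSum_nonneg (n : Int) (h : 0 ≤ n) : 0 ≤ pvDigitSum n := by
  rw [pvDigitSum_nonneg_eq n h]; positivity

lemma pvReduce_emod (fuel : Nat) : ∀ ds : Int, 0 ≤ ds →
    pvReduce fuel ds % 9 = ds % 9 ∧ 0 ≤ pvReduce fuel ds := by
  induction fuel with
  | zero => intro ds h; rw [pvReduce]; exact ⟨rfl, h⟩
  | succ fuel ih =>
    intro ds h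
    rw [pvReduce]
    by_cases h10 : ds ≥ 10
    · rw [if_pos h10]
      obtain ⟨h1, h2⟩ := ih (pvDigitSum ds) (pvDigitSum_nonneg ds h)
      exact ⟨by rw [h1, pvDigitSum_emod ds h], h2⟩
    · rw [if_neg h10]
      exact ⟨rfl, h⟩

-- ===== VERDICT (by name: the statement is the Claim_ definition above) =====
theorem calc_mingua_spec : Claim_equal_calc_mingua := by
  unfold Claim_equal_calc_mingua
  intro birth_year gender _ hpre
  unfold Spec_calc_mingua calc_mingua calc_mingua_alt
  have hpre' : (0 : Int) ≤ birth_year := hpre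
  set s := pvDigitSum birth_year with hs
  have hsnn : 0 ≤ s := pvDigitSum_nonneg birth_year hpre'
  obtain ⟨hmod, hnn⟩ := pvReduce_emod 100 s hsnn
  set ds := pvReduce 100 s with hds
  have h9 : (0:Int) < 9 := by norm_num
  have hr : s % 9 = ds % 9 := hmod.symm
  have hrb : 0 ≤ s % 9 ∧ s % 9 < 9 := ⟨Int.emod_nonneg s (by norm_num), Int.emod_lt_of_pos s h9⟩
  -- rewrite both PySem mods through emod
  have e1 : PySem.Int.mod (11 - ds) 9 = (11 - ds) % 9 := PySem.Int.mod_eq_emod_of_pos h9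
  have e2 : PySem.Int.mod (ds + 4) 9 = (ds + 4) % 9 := PySem.Int.mod_eq_emod_of_pos h9
  have e3 : PySem.Int.mod s 9 = s % 9 := PySem.Int.mod_eq_emod_of_pos h9
  have e1' : (11 - ds) % 9 = (11 - s % 9) % 9 := by
    conv_lhs => rw [show (11 - ds) = (11 - ds % 9) + 9 * -(ds / 9) by
      have := Int.emod_add_ediv ds 9; ring_nf; omega]
    rw [Int.add_mul_emod_self_left, hr]
  have e2' : (ds + 4) % 9 = (s % 9 + 4) % 9 := by
    conv_lhs => rw [show (ds + 4) = (ds % 9 + 4) + 9 * (ds / 9) by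
      have := Int.emod_add_ediv ds 9; ring_nf; omega]
    rw [Int.add_mul_emod_self_left, hr]
  simp only [e1, e2, e3, e1', e2']
  set r := s % 9 with hrdef
  have h0 : 0 ≤ r := hrb.1
  have h1 : r < 9 := hrb.2
  interval_cases r <;> split <;> decide
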